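-- pv_equiv track=rewrite | github.com/ColinMcArthur85/dns-diagnostic | logic/email_detector.py | _extract_dmarc_policy
-- ===== SOURCE A (Python) =====
-- def _extract_dmarc_policy(dmarc_value):
--     """
--     Extract the 'p=' policy from a DMARC record value.
--
--     Args:
--         dmarc_value: The DMARC TXT record value string
--
--     Returns:
--         The policy value ('none', 'quarantine', 'reject') or None
--     """
--     if not dmarc_value:
--         return None
--
--     parts = dmarc_value.split(';')
--     for part in parts:
--         part = part.strip()
--         if part.startswith('p='):
--             return part.split('=')[1].strip()
--
--     return None
-- ===== SOURCE B (Python) =====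
-- def _extract_dmarc_policy(dmarc_value):
--     """Parse the whole record into a tag table first, then look up 'p'."""
--     if not dmarc_value:
--         return None
--     tags = {}
--     for part in dmarc_value.split(';'):
--         part = part.strip()
--         if '=' in part:
--             key = part.split('=')[0]
--             value = part.split('=')[1].strip()
--             if key not in tags:
--                 tags[key] = value
--     return tags.get('p')
-- ===== Notes on version B (the rewrite author's own statement) =====
-- stated objective: alternative
-- what changed: Replaces the early-returning scan for the first 'p='-prefixed part with a build-table-then-lookup decomposition: one pass parses every 'key=value' part into a first-occurrence-wins tag dict, then the answer is tags.get('p').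
import Mathlib
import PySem

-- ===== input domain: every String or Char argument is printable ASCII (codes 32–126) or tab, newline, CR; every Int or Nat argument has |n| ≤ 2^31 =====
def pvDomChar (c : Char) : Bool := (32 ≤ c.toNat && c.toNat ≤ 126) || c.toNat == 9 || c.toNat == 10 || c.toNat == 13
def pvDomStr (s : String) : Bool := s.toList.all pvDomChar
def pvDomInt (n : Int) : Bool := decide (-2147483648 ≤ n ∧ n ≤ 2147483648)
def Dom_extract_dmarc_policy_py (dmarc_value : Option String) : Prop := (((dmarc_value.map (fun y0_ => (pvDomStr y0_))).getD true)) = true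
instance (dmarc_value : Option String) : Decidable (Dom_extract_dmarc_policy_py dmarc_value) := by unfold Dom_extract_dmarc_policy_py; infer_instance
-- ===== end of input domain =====

-- B replaces A's early-returning scan for the first 'p='-prefixed part by a
-- build-tag-table-then-lookup decomposition (first-occurrence-wins dict, then .get('p')).


-- ===== PORT A =====
-- the 'for part in parts: …' loop with its two early exits
def pvAScan : List (List Char) → Option String
  | [] => none
  | part0 :: rest =>
    let part := PySem.Chars.strip part0
    if PySem.Chars.startswith part ['p', '='] then
      -- part starts with "p=", so part.split('=') has ≥ 2 pieces and Python's [1] cannot raise;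
      -- getD 1 [] is exact here
      some (String.ofList (PySem.Chars.strip ((PySem.Chars.splitOn part ['=']).getD 1 [])))
    else pvAScan rest

def extract_dmarc_policy_py (dmarc_value : Option String) : Option String :=
  match dmarc_value with
  | none => none
  | some s =>
    if s = "" then none
    else pvAScan (PySem.Chars.splitOn s.toList [';'])

-- ===== PORT B =====
-- one iteration of B's dict-building loop
def pvBStep (d : PySem.Dict (List Char) (List Char)) (part0 : List Char) :
    PySem.Dict (List Char) (List Char) :=
  -- '=' in part, so part.split('=') has ≥ 2 pieces and Python's [0]/[1] cannot raise;
  -- like Source B, part.split('=') is recomputed for key and for value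
  if PySem.Chars.isIn ['='] (PySem.Chars.strip part0) then
    if d.contains ((PySem.Chars.splitOn (PySem.Chars.strip part0) ['=']).getD 0 []) then d
    else d.insert ((PySem.Chars.splitOn (PySem.Chars.strip part0) ['=']).getD 0 [])
      (PySem.Chars.strip ((PySem.Chars.splitOn (PySem.Chars.strip part0) ['=']).getD 1 []))
  else d

def extract_dmarc_policy_py_alt (dmarc_value : Option String) : Option String :=
  match dmarc_value with
  | none => none
  | some s =>
    if s = "" then none
    else
      (((PySem.Chars.splitOn s.toList [';']).foldl pvBStep PySem.Dict.empty).get? ['p']).map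
        String.ofList

-- ===== PRECONDITION & SPEC =====
def Spec_extract_dmarc_policy_py (dmarc_value : Option String) (out : Option String) : Prop := out = extract_dmarc_policy_py_alt dmarc_value
instance (dmarc_value : Option String) (out : Option String) : Decidable (Spec_extract_dmarc_policy_py dmarc_value out) := by unfold Spec_extract_dmarc_policy_py; infer_instance

-- ===== CLAIM (what is proved, stated in full; the proofs are below) =====
def Claim_equal_extract_dmarc_policy_py : Prop := ∀ (dmarc_value : Option String), Dom_extract_dmarc_policy_py dmarc_value → Spec_extract_dmarc_policy_py dmarc_value (extract_dmarc_policy_py dmarc_value)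

-- ===== LEMMAS AND PROOFS =====

-- structural model of splitOn with a single-character separator
def pvSplit1 (x : Char) : List Char → List (List Char)
  | [] => [[]]
  | c :: r => if c = x then [] :: pvSplit1 x r else (pvSplit1 x r).modifyHead (c :: ·)

theorem pvSplit1_ne_nil (x : Char) (l : List Char) : pvSplit1 x l ≠ [] := by
  cases l with
  | nil => simp [pvSplit1]
  | cons c r =>
    simp only [pvSplit1]
    split_ifs
    · simp
    · cases h : pvSplit1 x r with
      | nil => exact absurd h (pvSplit1_ne_nil x r)
      | cons a t => simp

theorem splitOn_go_eq (x : Char) : ∀ (fuel : Nat) (l cur : List Char) (acc : List (List Char)),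
    l.length < fuel →
    PySem.Chars.splitOn.go [x] fuel l cur acc =
      acc.reverse ++ (pvSplit1 x l).modifyHead (cur.reverse ++ ·) := by
  intro fuel
  induction fuel with
  | zero => intro l cur acc h; omega
  | succ n ih =>
    intro l cur acc h
    cases l with
    | nil => simp [PySem.Chars.splitOn.go, pvSplit1]
    | cons c r =>
      simp only [PySem.Chars.splitOn.go, List.isPrefixOf]
      by_cases hc : x = c
      · subst hc
        have hdrop : List.drop [x].length (x :: r) = r := rfl
        simp only [BEq.rfl, Bool.and_self, if_true, hdrop]
        rw [ih r [] (cur.reverse :: acc) (by simpa using Nat.lt_of_succ_lt_succ h)]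
        cases hps : pvSplit1 x r <;> simp [pvSplit1, List.modifyHead, hps]
      · rw [if_neg (by simp [hc] : ¬((x == c && true) = true))]
        rw [ih r (c :: cur) acc (by simpa using Nat.lt_of_succ_lt_succ h)]
        have hne : pvSplit1 x r ≠ [] := pvSplit1_ne_nil x r
        cases hs : pvSplit1 x r with
        | nil => exact absurd hs hne
        | cons a t =>
          simp [pvSplit1, Ne.symm hc, hs, List.modifyHead]

theorem splitOn_single (x : Char) (l : List Char) :
    PySem.Chars.splitOn l [x] = pvSplit1 x l := by
  unfold PySem.Chars.splitOn
  rw [splitOn_go_eq x (l.length + 1) l [] [] (by omega)]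
  cases hs : pvSplit1 x l with
  | nil => exact absurd hs (pvSplit1_ne_nil x l)
  | cons a t => simp [List.modifyHead]

theorem pvSplit1_head (x : Char) (l : List Char) :
    (pvSplit1 x l).getD 0 [] = l.takeWhile (fun c => ¬ (c = x)) := by
  induction l with
  | nil => simp [pvSplit1]
  | cons c r ihr =>
    simp only [pvSplit1, List.takeWhile]
    by_cases hc : c = x
    · simp [hc]
    · cases hs : pvSplit1 x r with
      | nil => exact absurd hs (pvSplit1_ne_nil x r)
      | cons a t =>
        rw [hs] at ihr
        simp_all [List.modifyHead]

theorem isIn_single (x : Char) (l : List Char) :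
    PySem.Chars.isIn [x] l = true ↔ x ∈ l := by
  rw [PySem.Chars.isIn_iff_infix]
  constructor
  · rintro ⟨s, t, rfl⟩; simp
  · intro hm
    obtain ⟨s, t, rfl⟩ := List.append_of_mem hm
    exact ⟨s, t, by simp⟩

-- A's branch condition, in B's terms
theorem cond_iff (l : List Char) :
    PySem.Chars.startswith l ['p', '='] = true ↔
      (PySem.Chars.isIn ['='] l = true ∧ (PySem.Chars.splitOn l ['=']).getD 0 [] = ['p']) := by
  rw [PySem.Chars.startswith_iff, isIn_single, splitOn_single, pvSplit1_head]
  constructor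
  · rintro ⟨t, rfl⟩
    refine ⟨by simp, ?_⟩
    simp [List.takeWhile]
  · rintro ⟨hmem, htw⟩
    cases l with
    | nil => simp at hmem
    | cons c r =>
      by_cases hc : c = '='
      · simp [hc] at htw
      · simp only [List.takeWhile_cons, hc] at htw
        obtain ⟨hcp, htw'⟩ := List.cons_eq_cons.mp htw
        subst hcp
        cases r with
        | nil =>
          simp only [List.mem_cons, List.not_mem_nil, or_false] at hmem
          exact absurd hmem.symm hc
        | cons c2 r2 =>
          by_cases hc2 : c2 = '='
          · subst hc2; exact ⟨r2, rfl⟩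
          · simp [hc2] at htw'

-- once 'p' is in the table, the rest of the loop never changes its value
theorem fold_stable (v : List Char) :
    ∀ (parts : List (List Char)) (d : PySem.Dict (List Char) (List Char)),
      d.get? ['p'] = some v → (parts.foldl pvBStep d).get? ['p'] = some v := by
  intro parts
  induction parts with
  | nil => intro d h; simpa using h
  | cons part rest ih =>
    intro d h
    refine ih _ ?_
    unfold pvBStep
    split_ifs with h1 h2
    · exact h
    · rcases eq_or_ne ((PySem.Chars.splitOn (PySem.Chars.strip part) ['=']).getD 0 []) ['p']
        with hk | hk
      · exfalso
        rw [hk, PySem.Dict.contains_eq_isSome_get?, h] at h2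
        simp at h2
      · rw [PySem.Dict.get?_insert_of_ne d _ (Ne.symm hk)]
        exact h
    · exact h

-- the scan equals the table lookup, for any start table not yet containing 'p'
theorem fold_eq_scan :
    ∀ (parts : List (List Char)) (d : PySem.Dict (List Char) (List Char)),
      d.get? ['p'] = none →
      ((parts.foldl pvBStep d).get? ['p']).map String.ofList = pvAScan parts := by
  intro parts
  induction parts with
  | nil => intro d h; simp [pvAScan, h]
  | cons part rest ih =>
    intro d h
    simp only [List.foldl_cons, pvAScan]
    by_cases hsw : PySem.Chars.startswith (PySem.Chars.strip part) ['p', '='] = true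
    · obtain ⟨hin, hkey⟩ := (cond_iff _).mp hsw
      have hstep : pvBStep d part =
          d.insert ['p'] (PySem.Chars.strip
            ((PySem.Chars.splitOn (PySem.Chars.strip part) ['=']).getD 1 [])) := by
        unfold pvBStep
        rw [if_pos hin, hkey,
          if_neg (by rw [PySem.Dict.contains_eq_isSome_get?, h]; simp)]
      rw [hstep, if_pos hsw,
        fold_stable _ rest _ (PySem.Dict.get?_insert_self _ _ _)]
      simp
    · rw [if_neg hsw]
      refine ih _ ?_
      unfold pvBStep
      split_ifs with h1 h2
      · exact h
      · rcases eq_or_ne ((PySem.Chars.splitOn (PySem.Chars.strip part) ['=']).getD 0 []) ['p']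
          with hk | hk
        · exact absurd ((cond_iff _).mpr ⟨h1, hk⟩) hsw
        · rw [PySem.Dict.get?_insert_of_ne d _ (Ne.symm hk)]; exact h
      · exact h

-- ===== VERDICT (by name: the statement is the Claim_ definition above) =====
theorem extract_dmarc_policy_py_spec : Claim_equal_extract_dmarc_policy_py := by
  intro dmarc_value _
  cases dmarc_value with
  | none => rfl
  | some s =>
    by_cases hs : s = ""
    · simp [Spec_extract_dmarc_policy_py, extract_dmarc_policy_py,
        extract_dmarc_policy_py_alt, hs]
    · simp only [Spec_extract_dmarc_policy_py, extract_dmarc_policy_py,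
        extract_dmarc_policy_py_alt, if_neg hs]
      exact (fold_eq_scan (PySem.Chars.splitOn s.toList [';']) PySem.Dict.empty
        (PySem.Dict.get?_empty _)).symm
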